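-- pv_equiv track=rewrite | github.com/JunYoungkKwon/Algorithm | programmers/2_level_trainning.py | solution
-- ===== SOURCE A (Python) =====
-- def solution(want, number, discount):
--     answer = 0
--     for i in range(0, len(discount)-9):
--         li = discount[i:i+10]
--         tf = True
--         for i in range(len(number)):
--             if li.count(want[i]) != number[i]:
--                 tf = False
--                 break
--         if tf:
--             answer += 1
--     return answer
-- ===== SOURCE B (Python) =====
-- def solution(want, number, discount):
--     wins = len(discount) - 9
--     if wins <= 0:
--         return 0
--     ok = [True] * wins
--     for w, need in zip(want[:len(number)], number):
--         if not any(ok):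
--             break
--         pref = [0]
--         c = 0
--         for d in discount:
--             c += (d == w)
--             pref.append(c)
--         ok = [o and pref[i + 10] - pref[i] == need for i, o in enumerate(ok)]
--     return sum(ok)
-- ===== Notes on version B (the rewrite author's own statement) =====
-- stated objective: faster
-- what changed: B replaces A's window-major rescan (slice each 10-day window and call list.count per wanted item) by category-major prefix-sum counting: one prefix-count array per wanted item, each window checked by an O(1) prefix difference against a per-window viability array, with an early stop once no window is still viable.
-- outside the precondition, e.g. on solution(['a'], [0, 1], ['a', 'a', 'a', 'a', 'a', 'a', 'a', 'a', 'a', 'a']): A returns 0, B returns 0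
import Mathlib
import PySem

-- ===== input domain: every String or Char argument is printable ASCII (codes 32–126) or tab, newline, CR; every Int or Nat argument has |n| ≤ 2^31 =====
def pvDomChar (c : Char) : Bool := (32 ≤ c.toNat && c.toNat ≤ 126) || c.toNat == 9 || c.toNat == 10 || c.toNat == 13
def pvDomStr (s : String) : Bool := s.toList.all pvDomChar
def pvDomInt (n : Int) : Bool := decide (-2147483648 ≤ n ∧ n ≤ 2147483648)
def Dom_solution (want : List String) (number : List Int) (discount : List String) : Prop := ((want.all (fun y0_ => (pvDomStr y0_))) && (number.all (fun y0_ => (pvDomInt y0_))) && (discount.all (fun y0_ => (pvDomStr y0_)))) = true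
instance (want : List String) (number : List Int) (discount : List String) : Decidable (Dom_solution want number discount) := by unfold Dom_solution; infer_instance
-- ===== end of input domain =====

-- B replaces A's per-window recount by per-category prefix-sum counting (alternative algorithm, same asymptotics).

-- ===== PORT A =====
-- inner loop 'for i in range(len(number)): if li.count(want[i]) != number[i]: tf=False; break'
-- want[i]/number[i] are in range under Pre_solution (IndexError there is excluded by Pre_), so getD is exact.
def pvInnerA (li want : List String) (number : List Int) (j : Nat) : Bool :=
  if _h : j < number.length then
    if ((PySem.List.count li (want.getD j "") : Int) ≠ number.getD j 0) then false
    else pvInnerA li want number (j + 1)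
  else true
termination_by number.length - j

def solution (want : List String) (number : List Int) (discount : List String) : Int :=
  (PySem.List.pyRange 0 ((discount.length : Int) - 9) 1).foldl
    (fun answer i =>
      let li := PySem.List.slice discount (some i) (some (i + 10))
      let tf := pvInnerA li want number 0
      if tf then answer + 1 else answer) 0

-- ===== PORT B =====
-- pref = [0]; c = 0; for d in discount: c += (d == w); pref.append(c)
def pvPref (w : String) (discount : List String) : List Int :=
  (discount.foldl (fun (st : Int × List Int) d =>
      let c := st.1 + (if d == w then 1 else 0)
      (c, st.2 ++ [c])) ((0 : Int), [(0 : Int)])).2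

-- enumerate(ok) ported via zipIdx (indices are the same values, as Nat); pref[i+10]/pref[i]
-- are always in range (len pref = len discount + 1), so getD is exact; the 'if not any(ok): break'
-- is ported as a step that leaves ok unchanged once all entries are false (the remaining Python
-- iterations are exactly the ones never executed, and the step is the identity from then on).
def solution_alt (want : List String) (number : List Int) (discount : List String) : Int :=
  let wins : Int := (discount.length : Int) - 9
  if wins ≤ 0 then 0
  else
    let ok0 : List Bool := List.replicate wins.toNat true
    let ok := ((want.take number.length).zip number).foldl
      (fun ok wn =>
        if ok.any (fun o => o) then
          let pref := pvPref wn.1 discount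
          ok.zipIdx.map (fun oi => oi.1 && decide (pref.getD (oi.2 + 10) 0 - pref.getD oi.2 0 = wn.2))
        else ok)
      ok0
    ok.foldl (fun a o => a + (if o then 1 else 0)) 0

-- ===== PRECONDITION & SPEC =====
-- Pre_ restricts to the natural domain len(number) ≤ len(want) (or no 10-day window at all, where
-- the lists are never indexed): outside it A raises IndexError on want[i] whenever some window
-- passes all in-range checks, and only returns (0) by accident of the early break; B returns
-- there instead of raising.
def Pre_solution (want : List String) (number : List Int) (discount : List String) : Prop :=
  number.length ≤ want.length ∨ discount.length < 10
instance (want : List String) (number : List Int) (discount : List String) : Decidable (Pre_solution want number discount) := by unfold Pre_solution; infer_instance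

def pvWitness_solution : List String × List Int × List String :=
  (["a"], [1], ["a", "b", "a", "c", "a", "a", "b", "c", "a", "b", "a"])

def Spec_solution (want : List String) (number : List Int) (discount : List String) (out : Int) : Prop := out = solution_alt want number discount
instance (want : List String) (number : List Int) (discount : List String) (out : Int) : Decidable (Spec_solution want number discount out) := by unfold Spec_solution; infer_instance

-- ===== CLAIM (what is proved, stated in full; the proofs are below) =====
def Claim_equal_solution : Prop := ∀ (want : List String) (number : List Int) (discount : List String), Dom_solution want number discount → Pre_solution want number discount → Spec_solution want number discount (solution want number discount)

-- ===== LEMMAS AND PROOFS =====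

-- helper predicate used only by the proofs: B's per-(window,category) test
def pvMatch (discount : List String) (i : Nat) (wn : String × Int) : Bool :=
  decide ((pvPref wn.1 discount).getD (i + 10) 0 - (pvPref wn.1 discount).getD i 0 = wn.2)

theorem pvPref_aux (w : String) :
    ∀ (l : List String) (c0 : Int) (p0 : List Int),
      l.foldl (fun (st : Int × List Int) d =>
          let c := st.1 + (if d == w then 1 else 0)
          (c, st.2 ++ [c])) (c0, p0)
      = (c0 + (l.count w : Int),
         p0 ++ (List.range l.length).map (fun i => c0 + (((l.take (i + 1)).count w : Int)))) := by
  intro l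
  induction l with
  | nil => intro c0 p0; simp
  | cons d l ih =>
    intro c0 p0
    rw [List.foldl_cons]
    refine Eq.trans (ih (c0 + (if d == w then 1 else 0)) (p0 ++ [c0 + (if d == w then 1 else 0)])) ?_
    refine Prod.ext ?_ ?_
    · by_cases h : d = w <;> simp [List.count_cons, h] <;> push_cast <;> ring
    · show (p0 ++ _) ++ _ = p0 ++ _
      rw [List.append_assoc]
      congr 1
      rw [List.length_cons, List.range_succ_eq_map]
      simp only [List.map_cons, List.map_map]
      rw [List.singleton_append]
      congr 1
      · by_cases h : d = w <;> simp [List.take_succ_cons, List.count_cons, h]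
      · refine List.map_congr_left (fun i _ => ?_)
        by_cases h : d = w <;>
          simp [Function.comp, List.take_succ_cons, List.count_cons, h] <;> push_cast <;> ring

theorem pvPref_getD (w : String) (l : List String) (i : Nat) (h : i ≤ l.length) :
    (pvPref w l).getD i 0 = ((l.take i).count w : Int) := by
  unfold pvPref
  rw [pvPref_aux]
  cases i with
  | zero => simp
  | succ j =>
    have hj : j < l.length := by omega
    rw [List.singleton_append, List.getD_cons_succ]
    simp [List.getD_eq_getElem?_getD, hj]

theorem pvPref_diff (w : String) (l : List String) (k : Nat) (hk : k + 10 ≤ l.length) :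
    (pvPref w l).getD (k + 10) 0 - (pvPref w l).getD k 0 = (((l.drop k).take 10).count w : Int) := by
  rw [pvPref_getD w l _ hk, pvPref_getD w l k (by omega), List.take_add, List.count_append]
  push_cast
  ring

theorem pvInnerA_eq_true_iff (li want : List String) (number : List Int) :
    ∀ (n j : Nat), number.length - j = n →
    (pvInnerA li want number j = true ↔
      ∀ k, j ≤ k → k < number.length →
        ((PySem.List.count li (want.getD k "")) : Int) = number.getD k 0) := by
  intro n
  induction n with
  | zero =>
    intro j hj
    have hge : ¬ j < number.length := by omega
    rw [pvInnerA]
    simp only [dif_neg hge]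
    constructor
    · intro _ k hk1 hk2; omega
    · intro _; trivial
  | succ n ih =>
    intro j hj
    have hjlt : j < number.length := by omega
    rw [pvInnerA]
    simp only [dif_pos hjlt]
    by_cases hne : ((PySem.List.count li (want.getD j "")) : Int) ≠ number.getD j 0
    · simp only [if_pos hne]
      constructor
      · intro h; exact absurd h (by simp)
      · intro hall; exact absurd (hall j le_rfl hjlt) hne
    · simp only [if_neg hne]
      push_neg at hne
      rw [ih (j + 1) (by omega)]
      constructor
      · intro h k hk1 hk2
        rcases eq_or_lt_of_le hk1 with rfl | hlt
        · exact hne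
        · exact h k (by omega) hk2
      · intro h k hk1 hk2
        exact h k (by omega) hk2

theorem pvSlice10 (discount : List String) (k : Nat) :
    PySem.List.slice discount (some (k : Int)) (some ((k : Int) + 10)) = (discount.drop k).take 10 := by
  have h := PySem.List.slice_natCast_add (xs := discount) (j := k) (n := 10)
  push_cast at h
  exact h

theorem solution_eq (want : List String) (number : List Int) (discount : List String) :
    solution want number discount =
    (((List.range (discount.length - 9)).countP
        (fun k => pvInnerA ((discount.drop k).take 10) want number 0)) : Int) := by
  unfold solution
  rw [PySem.List.pyRange_one]
  have hb : (((discount.length : Int) - 9) - 0).toNat = discount.length - 9 := by omega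
  rw [hb, List.foldl_map]
  have hfun : (fun (answer : Int) (k : Nat) =>
      let li := PySem.List.slice discount (some ((0 : Int) + k)) (some ((0 : Int) + k + 10))
      let tf := pvInnerA li want number 0
      if tf then answer + 1 else answer)
      = fun (answer : Int) (k : Nat) =>
        if pvInnerA ((discount.drop k).take 10) want number 0 then answer + 1 else answer := by
    funext a k
    simp only [zero_add, pvSlice10]
  rw [hfun, PySem.List.foldl_if_add_one]
  simp

theorem pvFoldB (discount : List String) :
    ∀ (cs : List (String × Int)) (ok : List Bool) (i : Nat),
    (cs.foldl (fun ok wn =>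
        if ok.any (fun o => o) then
          let pref := pvPref wn.1 discount
          ok.zipIdx.map (fun oi => oi.1 && decide (pref.getD (oi.2 + 10) 0 - pref.getD oi.2 0 = wn.2))
        else ok) ok)[i]?
    = ok[i]?.map (fun o => o && cs.all (fun wn => pvMatch discount i wn)) := by
  intro cs
  induction cs with
  | nil => intro ok i; cases h : ok[i]? <;> simp [h]
  | cons c cs ih =>
    intro ok i
    rw [List.foldl_cons]
    by_cases hany : ok.any (fun o => o)
    · rw [if_pos hany, ih]
      cases h : ok[i]? with
      | none => simp [List.getElem?_map, List.getElem?_zipIdx, h]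
      | some o =>
        simp [List.getElem?_map, List.getElem?_zipIdx, h, pvMatch, Bool.and_assoc]
    · rw [if_neg hany, ih]
      cases h : ok[i]? with
      | none => simp [h]
      | some o =>
        have ho : o = false := by
          have hmem : o ∈ ok := List.mem_of_getElem? h
          have hf : (ok.any fun o => o) = false := Bool.eq_false_iff.mpr hany
          have := List.any_eq_false.mp hf o hmem
          exact Bool.eq_false_iff.mpr this
        simp [h, ho]

theorem pvSumBools (l : List Bool) (a : Int) :
    l.foldl (fun a o => a + (if o then 1 else 0)) a = a + (l.countP (fun o => o) : Int) := by
  induction l generalizing a with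
  | nil => simp
  | cons x l ih =>
    rw [List.foldl_cons, ih, List.countP_cons]
    split_ifs <;> simp_all <;> push_cast <;> ring

theorem solution_alt_eq (want : List String) (number : List Int) (discount : List String) :
    solution_alt want number discount =
    (((List.range (discount.length - 9)).countP
        (fun i => ((want.take number.length).zip number).all (fun wn => pvMatch discount i wn))) : Int) := by
  unfold solution_alt
  by_cases hw : ((discount.length : Int) - 9) ≤ 0
  · have h0 : discount.length - 9 = 0 := by omega
    simp [hw, h0]
  · simp only [if_neg hw]
    have hW : (((discount.length : Int)) - 9).toNat = discount.length - 9 := by omega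
    have hok : (((want.take number.length).zip number).foldl
        (fun ok wn =>
          if ok.any (fun o => o) then
            let pref := pvPref wn.1 discount
            ok.zipIdx.map (fun oi => oi.1 && decide (pref.getD (oi.2 + 10) 0 - pref.getD oi.2 0 = wn.2))
          else ok)
        (List.replicate (((discount.length : Int)) - 9).toNat true))
        = (List.range (discount.length - 9)).map
            (fun i => ((want.take number.length).zip number).all (fun wn => pvMatch discount i wn)) := by
      refine List.ext_getElem? (fun i => ?_)
      rw [pvFoldB]
      by_cases hi : i < discount.length - 9
      · rw [List.getElem?_replicate_of_lt (by omega)]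
        simp [List.getElem?_map, List.getElem?_range, hi]
      · rw [List.getElem?_eq_none (by simp; omega), List.getElem?_eq_none (by simp; omega)]
        rfl
    rw [hok, pvSumBools, List.countP_map]
    simp
    rfl

theorem pvAllZip_iff (want : List String) (number : List Int) (discount : List String) (i : Nat)
    (hpre : number.length ≤ want.length) (hi : i + 10 ≤ discount.length) :
    (((want.take number.length).zip number).all (fun wn => pvMatch discount i wn) = true ↔
      ∀ k, k < number.length →
        ((((discount.drop i).take 10).count (want.getD k "")) : Int) = number.getD k 0) := by
  have hlen : ((want.take number.length).zip number).length = number.length := by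
    simp [List.length_zip]; omega
  have hup : ∀ (wn : String × Int), pvMatch discount i wn
      = decide (((((discount.drop i).take 10).count wn.1) : Int) = wn.2) := by
    intro wn
    unfold pvMatch
    rw [pvPref_diff _ _ _ hi]
  rw [List.all_eq_true]
  constructor
  · intro h k hk
    have hk' : k < ((want.take number.length).zip number).length := by omega
    have hmem := h _ (List.getElem_mem hk')
    rw [hup, List.getElem_zip] at hmem
    simp only [List.getElem_take] at hmem
    rw [decide_eq_true_iff] at hmem
    rwa [List.getD_eq_getElem _ _ (by omega : k < want.length), List.getD_eq_getElem _ _ hk]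
  · intro h wn hwn
    obtain ⟨k, hk, hwn'⟩ := List.getElem_of_mem hwn
    rw [List.getElem_zip] at hwn'
    rw [hup, ← hwn']
    simp only [List.getElem_take]
    rw [decide_eq_true_iff]
    have := h k (by omega)
    rwa [List.getD_eq_getElem _ _ (by omega : k < want.length),
      List.getD_eq_getElem _ _ (by omega : k < number.length)] at this

-- ===== VERDICT (by name: the statement is the Claim_ definition above) =====
theorem solution_spec : Claim_equal_solution := by
  intro want number discount _hdom hpre
  unfold Spec_solution
  rw [solution_eq, solution_alt_eq]
  rcases hpre with hpre | hsmall
  swap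
  · have h0 : discount.length - 9 = 0 := by omega
    rw [h0]
    rfl
  congr 1
  refine List.countP_congr (fun i hi => ?_)
  rw [List.mem_range] at hi
  have hi10 : i + 10 ≤ discount.length := by omega
  have hA := pvInnerA_eq_true_iff ((discount.drop i).take 10) want number number.length 0 rfl
  have hB := pvAllZip_iff want number discount i hpre hi10
  constructor
  · intro hT
    refine hB.mpr (fun k hk => ?_)
    have := hA.mp hT k (Nat.zero_le k) hk
    rwa [PySem.List.count_eq] at this
  · intro hT
    refine hA.mpr (fun k _ hk => ?_)
    rw [PySem.List.count_eq]
    exact hB.mp hT k hk
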